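-- pv_equiv track=rewrite | github.com/Andrew-Yasser/graph-search-algorithm-visualizer-desktop-app | AStar search algorithm.py | BuildDictWithCost
-- ===== SOURCE A (Python) =====
-- def BuildDictWithCost (nodes, graphdict, edges_weights):
--     OriginalValues=[]
--     ListofTupleValues=[]
--     NewVals = []
--     FlatOriginalValues = []
--     SizeofValuesofkey = []
--     for key, val in graphdict.items():
--          OriginalValues.append(val)
--     for sublist in OriginalValues:
--         for item in sublist:
--             FlatOriginalValues.append(item)
--     for i in range(len(FlatOriginalValues)):
--         ListofTupleValues.append((FlatOriginalValues[i],edges_weights[i]))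
--     for key, val in graphdict.items():
--         SizeofValuesofkey.append(len(graphdict[key]))
--     for number in SizeofValuesofkey:
--         vals = []
--         for i in range(number):
--             if len(ListofTupleValues):
--                 vals.append(ListofTupleValues.pop(0))
--         if len(vals):
--             NewVals.append(vals)
--     newgraph = dict(zip(nodes, NewVals))
--     return newgraph
-- ===== SOURCE B (Python) =====
-- def BuildDictWithCost(nodes, graphdict, edges_weights):
--     NewVals = []
--     idx = 0
--     for val in graphdict.values():
--         vals = [(item, edges_weights[idx + j]) for j, item in enumerate(val)]
--         idx += len(val)
--         if vals:
--             NewVals.append(vals)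
--     return dict(zip(nodes, NewVals))
-- ===== Notes on version B (the rewrite author's own statement) =====
-- stated objective: simpler
-- what changed: One pass over graphdict.values() with a running weight index replaces A's five loops (collect values, flatten, index-zip with weights, recompute sizes via dict lookups, redistribute by pop(0)); the flatten list, the tuple list and the pop(0) round trip disappear.
import Mathlib
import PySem

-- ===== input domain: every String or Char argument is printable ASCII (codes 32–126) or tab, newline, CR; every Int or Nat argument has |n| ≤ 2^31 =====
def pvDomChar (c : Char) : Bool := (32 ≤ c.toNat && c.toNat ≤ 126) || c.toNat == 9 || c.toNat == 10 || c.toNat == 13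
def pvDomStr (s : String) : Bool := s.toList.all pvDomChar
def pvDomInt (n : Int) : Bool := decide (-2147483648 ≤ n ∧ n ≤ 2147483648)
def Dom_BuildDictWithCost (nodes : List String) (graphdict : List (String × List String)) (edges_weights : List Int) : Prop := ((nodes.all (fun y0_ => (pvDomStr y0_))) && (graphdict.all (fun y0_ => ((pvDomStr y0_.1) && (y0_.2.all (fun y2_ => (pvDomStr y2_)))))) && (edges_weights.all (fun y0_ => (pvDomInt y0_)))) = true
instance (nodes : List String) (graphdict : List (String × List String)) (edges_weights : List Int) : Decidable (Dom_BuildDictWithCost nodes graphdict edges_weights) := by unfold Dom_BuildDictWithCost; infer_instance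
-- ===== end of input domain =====

-- B replaces A's flatten / index-zip / size-recomputation / pop(0)-redistribution round trip
-- by a single pass over graphdict.values() with a running weight index (objective: simpler).

-- ===== PORT A =====
def BuildDictWithCost (nodes : List String) (graphdict : List (String × List String)) (edges_weights : List Int) : List (String × List (String × Int)) :=
  let originalValues : List (List String) :=
    graphdict.foldl (fun acc kv => acc ++ [kv.2]) []
  let flatOriginalValues : List String :=
    originalValues.foldl (fun acc sub => sub.foldl (fun a it => a ++ [it]) acc) []
  let listofTupleValues : List (String × Int) :=
    (PySem.List.pyRange 0 (flatOriginalValues.length : Int) 1).foldl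
      (fun acc i => acc ++ [(PySem.List.pyGetD flatOriginalValues i "",
                             PySem.List.pyGetD edges_weights i 0)]) []
  let sizeofValuesofkey : List Nat :=
    graphdict.foldl (fun acc kv =>
      acc ++ [((PySem.Dict.get? (PySem.Dict.mk graphdict) kv.1).getD []).length]) []
  let st :=
    sizeofValuesofkey.foldl
      (fun (st : List (List (String × Int)) × List (String × Int)) (number : Nat) =>
        let p := (PySem.List.pyRange 0 (number : Int) 1).foldl
          (fun (p : List (String × Int) × List (String × Int)) _ =>
            match p.2 with            -- 'if len(ListofTupleValues): vals.append(pop(0))'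
            | [] => p
            | x :: rest => (p.1 ++ [x], rest)) ([], st.2)
        (if p.1.length ≠ 0 then st.1 ++ [p.1] else st.1, p.2))
      ([], listofTupleValues)
  ((nodes.zip st.1).foldl (fun d kv => PySem.Dict.insert d kv.1 kv.2) PySem.Dict.empty).items

-- ===== PORT B =====
def BuildDictWithCost_alt (nodes : List String) (graphdict : List (String × List String)) (edges_weights : List Int) : List (String × List (String × Int)) :=
  let st :=
    graphdict.foldl
      (fun (st : List (List (String × Int)) × Int) kv =>
        let vals := (PySem.List.enumerate kv.2 0).map
          (fun ji => (ji.2, PySem.List.pyGetD edges_weights (st.2 + ji.1) 0))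
        (if vals.isEmpty then st.1 else st.1 ++ [vals], st.2 + kv.2.length))
      ([], 0)
  ((nodes.zip st.1).foldl (fun d kv => PySem.Dict.insert d kv.1 kv.2) PySem.Dict.empty).items

-- ===== PRECONDITION & SPEC =====
-- Pre_ requires (a) enough edge weights for every listed neighbor — otherwise Python A raises
-- IndexError at edges_weights[i] — and (b) distinct keys in graphdict, since an association
-- list with duplicate keys does not represent any Python dict (dict construction collapses them).
def Pre_BuildDictWithCost (nodes : List String) (graphdict : List (String × List String)) (edges_weights : List Int) : Prop :=
  (graphdict.map Prod.fst).Nodup ∧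
  (graphdict.map (fun kv => kv.2.length)).sum ≤ edges_weights.length
instance (nodes : List String) (graphdict : List (String × List String)) (edges_weights : List Int) : Decidable (Pre_BuildDictWithCost nodes graphdict edges_weights) := by unfold Pre_BuildDictWithCost; infer_instance

def pvWitness_BuildDictWithCost : List String × (List (String × List String)) × List Int :=
  (["a", "b"], [("a", ["b", "c"]), ("b", [])], [3, 7])

def Spec_BuildDictWithCost (nodes : List String) (graphdict : List (String × List String)) (edges_weights : List Int) (out : List (String × List (String × Int))) : Prop := out = BuildDictWithCost_alt nodes graphdict edges_weights
instance (nodes : List String) (graphdict : List (String × List String)) (edges_weights : List Int) (out : List (String × List (String × Int))) : Decidable (Spec_BuildDictWithCost nodes graphdict edges_weights out) := by unfold Spec_BuildDictWithCost; infer_instance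

-- ===== CLAIM (what is proved, stated in full; the proofs are below) =====
def Claim_equal_BuildDictWithCost : Prop := ∀ (nodes : List String) (graphdict : List (String × List String)) (edges_weights : List Int), Dom_BuildDictWithCost nodes graphdict edges_weights → Pre_BuildDictWithCost nodes graphdict edges_weights → Spec_BuildDictWithCost nodes graphdict edges_weights (BuildDictWithCost nodes graphdict edges_weights)

-- ===== LEMMAS AND PROOFS =====

-- 'acc.append(f x)' loops are map
theorem pvFoldlSingleton {α β : Type} (f : α → β) (l : List α) : ∀ (acc : List β),
    l.foldl (fun a x => a ++ [f x]) acc = acc ++ l.map f := by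
  induction l with
  | nil => intro acc; simp
  | cons x l ih => intro acc; simp only [List.foldl_cons, List.map_cons]; rw [ih]; simp

theorem pvOrigFold (gd : List (String × List String)) :
    gd.foldl (fun acc kv => acc ++ [kv.2]) [] = gd.map (fun kv => kv.2) := by
  simpa using pvFoldlSingleton (fun kv => kv.2) gd []

-- the nested append loop is flatten
theorem pvAppFold (sub : List String) : ∀ (acc : List String),
    sub.foldl (fun a it => a ++ [it]) acc = acc ++ sub := by
  induction sub with
  | nil => intro acc; simp
  | cons x sub ih => intro acc; simp only [List.foldl_cons]; rw [ih]; simp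

theorem pvFlatFold (ls : List (List String)) : ∀ (acc : List String),
    ls.foldl (fun acc sub => sub.foldl (fun a it => a ++ [it]) acc) acc = acc ++ ls.flatten := by
  induction ls with
  | nil => intro acc; simp
  | cons l ls ih => intro acc; simp only [List.foldl_cons]; rw [pvAppFold, ih]; simp

theorem pvFlatFoldNil (ls : List (List String)) :
    ls.foldl (fun acc sub => sub.foldl (fun a it => a ++ [it]) acc) [] = ls.flatten := by
  simpa using pvFlatFold ls []

-- A's index-zip loop builds flat.zip ws when there are enough weights
theorem pvTuplesEq (flat : List String) (ws : List Int) (h : flat.length ≤ ws.length) :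
    (PySem.List.pyRange 0 (flat.length : Int) 1).foldl
      (fun acc i => acc ++ [(PySem.List.pyGetD flat i "", PySem.List.pyGetD ws i 0)]) []
    = flat.zip ws := by
  rw [show (PySem.List.pyRange 0 (flat.length : Int) 1).foldl
      (fun acc i => acc ++ [(PySem.List.pyGetD flat i "", PySem.List.pyGetD ws i 0)]) []
      = (PySem.List.pyRange 0 (flat.length : Int) 1).map
          (fun i => (PySem.List.pyGetD flat i "", PySem.List.pyGetD ws i 0)) from by
    simpa using pvFoldlSingleton _ _ []]
  rw [PySem.List.pyRange_one, List.map_map]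
  apply List.ext_getElem
  · simp; omega
  · intro i h1 h2
    have hiF : i < flat.length := by simpa using h1
    have hiW : i < ws.length := by omega
    simp [Function.comp, PySem.List.pyGetD_natCast, hiF, hiW]

-- dict lookup of a present key under distinct keys returns its own value
theorem pvDictGetSelf (gd : List (String × List String)) (hnd : (gd.map Prod.fst).Nodup)
    (kv : String × List String) (hmem : kv ∈ gd) :
    PySem.Dict.get? (PySem.Dict.mk gd) kv.1 = some kv.2 := by
  induction gd with
  | nil => cases hmem
  | cons hd tl ih =>
    obtain ⟨k, v⟩ := hd
    rw [List.map_cons, List.nodup_cons] at hnd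
    obtain ⟨h1, h2⟩ := hnd
    rw [PySem.Dict.get?_mk_cons]
    rcases List.mem_cons.mp hmem with rfl | hmem'
    · simp
    · have hne : (k == kv.1) = false := by
        refine beq_eq_false_iff_ne.mpr ?_
        intro he
        apply h1
        rw [he]
        exact List.mem_map.mpr ⟨kv, hmem', rfl⟩
      rw [hne]
      simpa using ih h2 hmem'

theorem pvSizesEq (gd : List (String × List String)) (hnd : (gd.map Prod.fst).Nodup) :
    gd.foldl (fun acc kv =>
        acc ++ [((PySem.Dict.get? (PySem.Dict.mk gd) kv.1).getD []).length]) []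
    = gd.map (fun kv => kv.2.length) := by
  rw [show gd.foldl (fun acc kv =>
        acc ++ [((PySem.Dict.get? (PySem.Dict.mk gd) kv.1).getD []).length]) []
      = gd.map (fun kv => ((PySem.Dict.get? (PySem.Dict.mk gd) kv.1).getD []).length) from by
    simpa using pvFoldlSingleton _ gd []]
  apply List.map_congr_left
  intro kv hkv
  rw [pvDictGetSelf gd hnd kv hkv]
  rfl

-- A's guarded pop(0) loop takes a prefix and leaves the rest
theorem pvInnerGen (l : List Int) : ∀ (acc rem : List (String × Int)),
    l.foldl (fun (p : List (String × Int) × List (String × Int)) _ =>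
      match p.2 with
      | [] => p
      | x :: rest => (p.1 ++ [x], rest)) (acc, rem)
    = (acc ++ rem.take l.length, rem.drop l.length) := by
  induction l with
  | nil => intro acc rem; simp
  | cons y l ih =>
    intro acc rem
    cases rem with
    | nil => simpa using ih acc []
    | cons x rest => simpa [List.append_assoc] using ih (acc ++ [x]) rest

theorem pvInnerLoop (n : Nat) (rem : List (String × Int)) :
    (PySem.List.pyRange 0 (n : Int) 1).foldl
      (fun (p : List (String × Int) × List (String × Int)) _ =>
        match p.2 with
        | [] => p
        | x :: rest => (p.1 ++ [x], rest)) ([], rem)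
    = (rem.take n, rem.drop n) := by
  rw [pvInnerGen]
  simp [PySem.List.length_pyRange_one]

-- zip distributes over an append of the left list when the right list is long enough
theorem pvZipAppend {α β : Type} (a : List α) : ∀ (b : List α) (ws : List β),
    a.length ≤ ws.length → (a ++ b).zip ws = a.zip ws ++ b.zip (ws.drop a.length) := by
  induction a with
  | nil => intro b ws _; simp
  | cons x a ih =>
    intro b ws h
    cases ws with
    | nil => simp at h
    | cons w ws =>
      simp only [List.cons_append, List.zip_cons_cons, List.length_cons, List.drop_succ_cons]
      rw [ih b ws (by simpa using h)]

-- B's enumerate comprehension builds v.zip of a weight suffix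
theorem pvEnumZip (ws : List Int) (v : List String) : ∀ (s t : Int), 0 ≤ s → 0 ≤ t →
    (t + s).toNat + v.length ≤ ws.length →
    (PySem.List.enumerate v s).map (fun ji => (ji.2, PySem.List.pyGetD ws (t + ji.1) 0))
    = v.zip (ws.drop (t + s).toNat) := by
  induction v with
  | nil => intro s t _ _ _; simp [PySem.List.enumerate_nil]
  | cons x v ih =>
    intro s t hs ht h
    have h' : (t + s).toNat + (v.length + 1) ≤ ws.length := by simpa using h
    have hlt : (t + s).toNat < ws.length := by omega
    have hgd : PySem.List.pyGetD ws (t + s) 0 = ws[(t + s).toNat] := by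
      apply PySem.List.pyGetD_eq_getElem <;> omega
    rw [PySem.List.enumerate_cons, List.map_cons]
    rw [ih (s + 1) t (by omega) ht (by omega)]
    dsimp only
    have h2 : (t + (s + 1)).toNat = (t + s).toNat + 1 := by omega
    rw [h2, List.drop_eq_getElem_cons hlt, List.zip_cons_cons, hgd]

theorem pvEnumZip0 (ws : List Int) (v : List String) (idx : Nat)
    (h : idx + v.length ≤ ws.length) :
    (PySem.List.enumerate v 0).map
      (fun ji => (ji.2, PySem.List.pyGetD ws ((idx : Int) + ji.1) 0))
    = v.zip (ws.drop idx) := by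
  have := pvEnumZip ws v 0 (idx : Int) le_rfl (Int.natCast_nonneg idx) (by omega)
  simpa using this

-- the central lemma: A's redistribution fold equals B's single pass
theorem pvOuterEq (ws : List Int) (vs : List (String × List String)) :
    ∀ (idx : Nat) (acc : List (List (String × Int))) (ws0 : List Int) (i0 : Int),
    ws0 = ws.drop idx → i0 = (idx : Int) →
    (vs.map (fun kv => kv.2.length)).sum + idx ≤ ws.length →
    ((vs.map (fun kv => kv.2.length)).foldl
        (fun (st : List (List (String × Int)) × List (String × Int)) (number : Nat) =>
          let p := (PySem.List.pyRange 0 (number : Int) 1).foldl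
            (fun (p : List (String × Int) × List (String × Int)) _ =>
              match p.2 with
              | [] => p
              | x :: rest => (p.1 ++ [x], rest)) ([], st.2)
          (if p.1.length ≠ 0 then st.1 ++ [p.1] else st.1, p.2))
        (acc, ((vs.map (fun kv => kv.2)).flatten).zip ws0)).1
    = (vs.foldl
        (fun (st : List (List (String × Int)) × Int) kv =>
          let vals := (PySem.List.enumerate kv.2 0).map
            (fun ji => (ji.2, PySem.List.pyGetD ws (st.2 + ji.1) 0))
          (if vals.isEmpty then st.1 else st.1 ++ [vals], st.2 + kv.2.length))
        (acc, i0)).1 := by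
  induction vs with
  | nil => intro idx acc ws0 i0 _ _ _; simp
  | cons kv vs ih =>
    intro idx acc ws0 i0 hws0 hi0 hsum
    subst hws0; subst hi0
    simp only [List.map_cons, List.sum_cons] at hsum
    have hnle : kv.2.length ≤ (ws.drop idx).length := by
      rw [List.length_drop]; omega
    simp only [List.map_cons, List.foldl_cons, List.flatten_cons]
    rw [pvZipAppend kv.2 _ _ hnle, pvInnerLoop]
    have hlenc : (kv.2.zip (ws.drop idx)).length = kv.2.length := by
      rw [List.length_zip]; omega
    rw [List.take_left' hlenc, List.drop_left' hlenc]
    rw [pvEnumZip0 ws kv.2 idx (by omega)]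
    have hdd : (ws.drop idx).drop kv.2.length = ws.drop (kv.2.length + idx) := by
      rw [List.drop_drop, Nat.add_comm]
    rw [hdd]
    have hacc : (if (kv.2.zip (ws.drop idx)).length ≠ 0 then acc ++ [kv.2.zip (ws.drop idx)] else acc)
        = (if (kv.2.zip (ws.drop idx)).isEmpty then acc else acc ++ [kv.2.zip (ws.drop idx)]) := by
      cases kv.2.zip (ws.drop idx) <;> simp
    rw [hacc]
    exact ih (kv.2.length + idx) _ (ws.drop (kv.2.length + idx)) _
      rfl (by push_cast; ring) (by omega)

-- ===== VERDICT (by name: the statement is the Claim_ definition above) =====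
theorem BuildDictWithCost_spec : Claim_equal_BuildDictWithCost := by
  intro nodes gd ws _ hpre
  obtain ⟨hnd, hsum⟩ := hpre
  unfold Spec_BuildDictWithCost
  simp only [BuildDictWithCost, BuildDictWithCost_alt]
  rw [pvOrigFold gd, pvFlatFoldNil]
  have hlen : ((gd.map (fun kv => kv.2)).flatten).length ≤ ws.length := by
    simpa [List.length_flatten, List.map_map, Function.comp] using hsum
  rw [pvTuplesEq _ ws hlen]
  rw [pvSizesEq gd hnd]
  rw [pvOuterEq ws gd 0 [] ws 0 (by simp) (by simp) (by simpa using hsum)]
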